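-- pv_equiv track=rewrite | github.com/tk032/python-CodingTest | 프로그래머스/0/181864. 문자열 바꿔서 찾기/문자열 바꿔서 찾기.py | solution
-- ===== SOURCE A (Python) =====
-- def solution(myString, pat):
--     answer = 0
--     new = ''
--     for i in myString:
--         if i == "A":
--             temp = "B"
--         else:
--             temp = "A"
--         new += temp
--     if pat in new:
--         answer = 1
--     return answer
-- ===== SOURCE B (Python) =====
-- def solution(myString, pat):
--     # Translate the needle once: in the swapped text a 'B' can only come from 'A'
--     # and an 'A' from any non-'A' char; any other char in pat can never match.
--     need = []
--     for c in pat: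
--         if c == 'B':
--             need.append(True)
--         elif c == 'A':
--             need.append(False)
--         else:
--             return 0
--     hay = [c == 'A' for c in myString]
--     m = len(hay)
--     k = len(need)
--     return 1 if any(hay[i:i + k] == need for i in range(m - k + 1)) else 0
-- ===== Notes on version B (the rewrite author's own statement) =====
-- stated objective: faster
-- what changed: Instead of materialising the whole swapped text by quadratic string concatenation and substring-searching it, B translates the pattern once into a boolean mask (B->came-from-A, A->came-from-non-A, anything else -> impossible, return 0) and searches that mask in the boolean 'is A' profile of the untouched original string.
import Mathlib
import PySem

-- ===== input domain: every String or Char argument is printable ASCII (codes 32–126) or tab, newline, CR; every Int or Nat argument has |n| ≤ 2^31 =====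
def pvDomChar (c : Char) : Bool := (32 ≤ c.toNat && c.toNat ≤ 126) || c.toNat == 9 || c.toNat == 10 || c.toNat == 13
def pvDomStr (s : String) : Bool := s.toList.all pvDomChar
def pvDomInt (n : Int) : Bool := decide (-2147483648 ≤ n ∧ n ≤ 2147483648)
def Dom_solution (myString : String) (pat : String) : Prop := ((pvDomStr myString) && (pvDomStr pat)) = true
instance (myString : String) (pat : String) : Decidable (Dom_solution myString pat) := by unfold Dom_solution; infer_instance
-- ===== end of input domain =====

-- B translates the pattern once into a boolean mask and searches it in the
-- boolean 'is A' profile of the untouched original string, instead of building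
-- the whole swapped text by repeated += and substring-searching it (measured faster in a timing run).


-- ===== PORT A =====
-- 'new' is built char by char by appending the swapped char; 'pat in new' is Chars.isIn.
def solution (myString : String) (pat : String) : Int :=
  let new : List Char :=
    myString.toList.foldl (fun acc i => acc ++ [if i == 'A' then 'B' else 'A']) []
  if PySem.Chars.isIn pat.toList new then 1 else 0

-- ===== PORT B =====
-- needOf: the pattern translated to a mask (some) or an impossible char found (none = early return 0).
def needOf : List Char → Option (List Bool)
  | [] => some []
  | c :: t =>
    if c == 'B' then (needOf t).map (true :: ·)
    else if c == 'A' then (needOf t).map (false :: ·)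
    else none

-- scanMask: any(hay[i:i+k] == need for i in range(m-k+1)) as a slide over hay.
def scanMask : List Bool → List Bool → Bool
  | hay, need =>
    if need.length ≤ hay.length then
      if hay.take need.length == need then true
      else
        match hay with
        | [] => false
        | _ :: t => scanMask t need
    else false

def solution_alt (myString : String) (pat : String) : Int :=
  match needOf pat.toList with
  | none => 0
  | some need =>
    let hay := myString.toList.map (fun c => c == 'A')
    if scanMask hay need then 1 else 0

-- ===== PRECONDITION & SPEC =====
def Spec_solution (myString : String) (pat : String) (out : Int) : Prop := out = solution_alt myString pat
instance (myString : String) (pat : String) (out : Int) : Decidable (Spec_solution myString pat out) := by unfold Spec_solution; infer_instance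

-- ===== CLAIM (what is proved, stated in full; the proofs are below) =====
def Claim_equal_solution : Prop := ∀ (myString : String) (pat : String), Dom_solution myString pat → Spec_solution myString pat (solution myString pat)

-- ===== LEMMAS AND PROOFS =====

def swapAB (c : Char) : Char := if c == 'A' then 'B' else 'A'

theorem scanMask_iff (hay need : List Bool) : scanMask hay need = true ↔ need <:+: hay := by
  induction hay with
  | nil =>
    unfold scanMask
    constructor
    · intro h
      split at h
      · split at h
        · next heq => simp_all
        · exact absurd h (by simp)
      · exact absurd h (by simp)
    · intro h
      have : need = [] := List.eq_nil_of_infix_nil h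
      simp [this]
  | cons a t ih =>
    unfold scanMask
    rw [List.infix_cons_iff]
    constructor
    · intro h
      split at h
      · split at h
        · next heq =>
          left
          rw [List.prefix_iff_eq_take]
          simpa using (beq_iff_eq.mp heq).symm
        · right
          exact ih.mp h
      · exact absurd h (by simp)
    · intro h
      rcases h with h | h
      · have hlen : need.length ≤ t.length + 1 := by simpa using h.length_le
        have htake : (a :: t).take need.length == need := by
          simp [(List.prefix_iff_eq_take.mp h).symm]
        simp [hlen, htake]
      · have hlen : need.length ≤ (a :: t).length :=
          le_trans h.length_le (by simp)
        simp only [hlen, if_true]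
        split
        · rfl
        · exact ih.mpr h

-- characterisation of needOf
theorem needOf_some {l : List Char} {need : List Bool} (h : needOf l = some need) :
    (∀ c ∈ l, c = 'A' ∨ c = 'B') ∧ need = l.map (fun c => c == 'B') := by
  induction l generalizing need with
  | nil => simp [needOf] at h; simp [h.symm]
  | cons c t ih =>
    unfold needOf at h
    by_cases hb : c = 'B'
    · subst hb
      simp at h
      obtain ⟨m, hm, hcons⟩ := h
      obtain ⟨h1, h2⟩ := ih hm
      refine ⟨?_, ?_⟩
      · intro x hx; simp at hx
        rcases hx with rfl | hx
        · right; rfl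
        · exact h1 x hx
      · simp [← hcons, h2]
    · by_cases ha : c = 'A'
      · subst ha
        simp at h
        obtain ⟨m, hm, hcons⟩ := h
        obtain ⟨h1, h2⟩ := ih hm
        refine ⟨?_, ?_⟩
        · intro x hx; simp at hx
          rcases hx with rfl | hx
          · left; rfl
          · exact h1 x hx
        · simp [← hcons, h2]
      · simp [hb, ha] at h

theorem needOf_none {l : List Char} (h : needOf l = none) :
    ∃ c ∈ l, c ≠ 'A' ∧ c ≠ 'B' := by
  induction l with
  | nil => simp [needOf] at h
  | cons c t ih =>
    unfold needOf at h
    by_cases hb : c = 'B'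
    · subst hb; simp at h
      obtain ⟨x, hx, h1, h2⟩ := ih h
      exact ⟨x, by simp [hx], h1, h2⟩
    · by_cases ha : c = 'A'
      · subst ha; simp at h
        obtain ⟨x, hx, h1, h2⟩ := ih h
        exact ⟨x, by simp [hx], h1, h2⟩
      · exact ⟨c, by simp, ha, hb⟩

theorem swapAB_mem (c : Char) : swapAB c = 'A' ∨ swapAB c = 'B' := by
  unfold swapAB; split <;> simp

-- (· == 'B') ∘ swapAB = (· == 'A')
theorem comp_swap (c : Char) : (swapAB c == 'B') = (c == 'A') := by
  unfold swapAB
  by_cases h : c = 'A' <;> simp [h]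

-- the mask map is injective on A/B-only strings
theorem map_isB_inj {m p : List Char}
    (hm : ∀ c ∈ m, c = 'A' ∨ c = 'B') (hp : ∀ c ∈ p, c = 'A' ∨ c = 'B')
    (h : m.map (fun c => c == 'B') = p.map (fun c => c == 'B')) : m = p := by
  induction m generalizing p with
  | nil => cases p <;> simp_all
  | cons a t ih =>
    cases p with
    | nil => simp at h
    | cons b q =>
      simp at h
      obtain ⟨h1, h2⟩ := h
      have ha := hm a (by simp)
      have hb := hp b (by simp)
      have hab : a = b := by
        rcases ha with ha | ha <;> rcases hb with hb | hb <;> simp_all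
      rw [hab, ih (fun c hc => hm c (by simp [hc])) (fun c hc => hp c (by simp [hc])) h2]

-- the central equivalence: pat infix of swapped text ↔ mask infix of 'is A' profile
theorem infix_swap_iff {s p : List Char} (hp : ∀ c ∈ p, c = 'A' ∨ c = 'B') :
    p <:+: s.map swapAB ↔ (p.map (fun c => c == 'B')) <:+: (s.map (fun c => c == 'A')) := by
  have hmap : s.map (fun c => c == 'A') = (s.map swapAB).map (fun c => c == 'B') := by
    rw [List.map_map]; exact (List.map_congr_left fun c _ => (comp_swap c).symm)
  constructor
  · rintro ⟨l, r, hlr⟩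
    exact ⟨l.map (fun c => c == 'B'), r.map (fun c => c == 'B'), by
      rw [hmap, ← hlr]; simp⟩
  · rintro ⟨l, r, hlr⟩
    rw [hmap] at hlr
    have hlr' : (s.map swapAB).map (fun c => c == 'B') = l ++ (p.map (fun c => c == 'B') ++ r) := by
      rw [← hlr]; simp
    obtain ⟨l₁, rest, hsplit, hl₁, hrest⟩ := List.map_eq_append_iff.mp hlr'
    obtain ⟨m₁, r₁, hsplit2, hm₁, hr₁⟩ := List.map_eq_append_iff.mp hrest
    have hmem : ∀ c ∈ m₁, c = 'A' ∨ c = 'B' := by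
      intro c hc
      have : c ∈ s.map swapAB := by
        rw [hsplit, hsplit2]; simp [hc]
      obtain ⟨x, _, hx⟩ := List.mem_map.mp this
      rw [← hx]; exact swapAB_mem x
    have hmp : m₁ = p := map_isB_inj hmem hp hm₁
    subst hmp
    exact ⟨l₁, r₁, by rw [hsplit, hsplit2]; simp⟩

-- ===== VERDICT (by name: the statement is the Claim_ definition above) =====
theorem solution_spec : Claim_equal_solution := by
  intro myString pat _
  unfold Spec_solution solution solution_alt
  rw [PySem.List.foldl_append_singleton_eq_map (f := fun i => if i == 'A' then 'B' else 'A')]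
  simp only [List.nil_append]
  have hswap : (myString.toList.map fun i => if i == 'A' then 'B' else 'A')
      = myString.toList.map swapAB := rfl
  rw [hswap]
  cases hneed : needOf pat.toList with
  | none =>
    obtain ⟨c, hc, ha, hb⟩ := needOf_none hneed
    have : PySem.Chars.isIn pat.toList (myString.toList.map swapAB) = false := by
      rw [PySem.Chars.isIn_eq_false_iff]
      intro hinf
      have : c ∈ myString.toList.map swapAB := hinf.mem hc
      obtain ⟨x, _, hx⟩ := List.mem_map.mp this
      rcases swapAB_mem x with h | h <;> rw [hx] at h <;> [exact ha h; exact hb h]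
    simp [this]
  | some need =>
    obtain ⟨hp, hmask⟩ := needOf_some hneed
    by_cases h : PySem.Chars.isIn pat.toList (myString.toList.map swapAB) = true
    · have hinf := (PySem.Chars.isIn_iff_infix _ _).mp h
      have := (infix_swap_iff hp).mp hinf
      rw [← hmask] at this
      simp [h, (scanMask_iff _ _).mpr this]
    · have hfalse : PySem.Chars.isIn pat.toList (myString.toList.map swapAB) = false := by
        simpa using h
      have hni := (PySem.Chars.isIn_eq_false_iff _ _).mp hfalse
      have hscan : scanMask (myString.toList.map fun c => c == 'A') need = false := by
        rw [← Bool.not_eq_true, scanMask_iff, hmask]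
        intro hinf
        exact hni ((infix_swap_iff hp).mpr hinf)
      simp [hfalse, hscan]
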